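-- pv_equiv track=rewrite | github.com/ryn-cx/gapi | src/gapi/__init__.py | _class_has_field
-- ===== SOURCE A (Python) =====
-- from collections.abc import Sequence
--
-- def _class_has_field(
--     lines: Sequence[str],
--     class_index: int,
--     field_name: str,
-- ) -> bool:
--     i = class_index + 1
--     while i < len(lines):
--         # Stop if we hit another class definition
--         if lines[i].strip().startswith("class "):
--             return False
--         # Check if this line contains the field
--         if lines[i].strip().startswith(f"{field_name}:"):
--             return True
--         i += 1
--     return False
-- ===== SOURCE B (Python) =====
-- def _class_has_field(lines, class_index, field_name):
--     # Different algorithm: instead of one interleaved early-exit scan, locate the FIRST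
--     # class-boundary line and the FIRST field line independently over the whole tail,
--     # then decide by comparing the two positions: the field belongs to this class iff
--     # its first occurrence comes strictly before the first class boundary.
--     tail = [line.strip() for line in lines[class_index + 1:]]
--     n = len(tail)
--     first_class = next((i for i, s in enumerate(tail) if s.startswith("class ")), n)
--     prefix = field_name + ":"
--     first_field = next((i for i, s in enumerate(tail)
--                         if s.startswith(prefix) and not s.startswith("class ")), n)
--     return first_field < first_class
-- ===== Notes on version B (the rewrite author's own statement) =====
-- stated objective: alternative
-- what changed: B replaces A's single interleaved early-exit scan (which strips each line up to twice and indexes by position) by stripping the tail once, then two independent first-occurrence searches (first class boundary, first field line that is not a class line), deciding by comparing the two indices.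
-- outside the precondition, e.g. on _class_has_field(['x: 1', 'a', 'b'], -3, 'x'): A returns True, B returns False
import Mathlib
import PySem

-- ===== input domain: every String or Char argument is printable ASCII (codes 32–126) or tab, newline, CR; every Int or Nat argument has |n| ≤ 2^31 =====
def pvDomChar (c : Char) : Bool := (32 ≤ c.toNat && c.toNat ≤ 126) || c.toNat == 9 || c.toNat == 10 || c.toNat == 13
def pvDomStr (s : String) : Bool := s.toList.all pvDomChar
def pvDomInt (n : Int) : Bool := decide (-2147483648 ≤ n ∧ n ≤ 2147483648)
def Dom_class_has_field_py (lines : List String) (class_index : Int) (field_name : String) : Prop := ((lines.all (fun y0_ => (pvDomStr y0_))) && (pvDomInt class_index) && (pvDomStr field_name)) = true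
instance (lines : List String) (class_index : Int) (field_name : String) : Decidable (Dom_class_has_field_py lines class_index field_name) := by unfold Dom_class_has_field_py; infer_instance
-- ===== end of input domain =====

-- B decides by comparing two independently-found first-occurrence indices (first class
-- boundary vs first field line) in the stripped tail, instead of A's interleaved
-- early-exit scan; the tail is stripped once instead of per-check (objective: alternative).


-- ===== PORT A =====
-- the while loop: i counts up from class_index+1 while i < len(lines); fuel = number of
-- remaining iterations ((len - i).toNat). pyGet? none (Python IndexError) is outside Pre_.
def classHasFieldGoA (lines : List String) (field_name : String) : Nat → Int → Bool
  | 0, _ => false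
  | fuel + 1, i =>
    match PySem.List.pyGet? lines i with
    | none => false  -- Python raises IndexError here; excluded by Pre_
    | some l =>
      if PySem.Str.startswith (PySem.Str.strip l) "class " then false
      else if PySem.Str.startswith (PySem.Str.strip l) (field_name ++ ":") then true
      else classHasFieldGoA lines field_name fuel (i + 1)

def class_has_field_py (lines : List String) (class_index : Int) (field_name : String) : Bool :=
  classHasFieldGoA lines field_name ((lines.length - (class_index + 1)).toNat) (class_index + 1)

-- ===== PORT B =====
def class_has_field_py_alt (lines : List String) (class_index : Int) (field_name : String) : Bool :=
  let tail := (PySem.List.slice lines (some (class_index + 1)) none).map PySem.Str.strip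
  let n := tail.length
  let firstClass := (tail.findIdx? (fun s => PySem.Str.startswith s "class ")).getD n
  let firstField := (tail.findIdx? (fun s =>
      PySem.Str.startswith s (field_name ++ ":") && !PySem.Str.startswith s "class ")).getD n
  decide (firstField < firstClass)

-- ===== PRECONDITION & SPEC =====
-- Pre_ excludes class_index ≤ -2: out-of-contract start positions (class_index is meant to be
-- the index of a "class" line) on which A either raises IndexError or starts its scan at a
-- position wrapped from the end of the list — a corner no caller specifies, where B's
-- slice-based value is as defensible as A's.
def Pre_class_has_field_py (lines : List String) (class_index : Int) (field_name : String) : Prop :=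
  -1 ≤ class_index
instance (lines : List String) (class_index : Int) (field_name : String) : Decidable (Pre_class_has_field_py lines class_index field_name) := by unfold Pre_class_has_field_py; infer_instance

def pvWitness_class_has_field_py : List String × Int × String := (["class A:", "  x: int"], 0, "x")

def Spec_class_has_field_py (lines : List String) (class_index : Int) (field_name : String) (out : Bool) : Prop := out = class_has_field_py_alt lines class_index field_name
instance (lines : List String) (class_index : Int) (field_name : String) (out : Bool) : Decidable (Spec_class_has_field_py lines class_index field_name out) := by unfold Spec_class_has_field_py; infer_instance

-- ===== CLAIM (what is proved, stated in full; the proofs are below) =====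
def Claim_equal_class_has_field_py : Prop := ∀ (lines : List String) (class_index : Int) (field_name : String), Dom_class_has_field_py lines class_index field_name → Pre_class_has_field_py lines class_index field_name → Spec_class_has_field_py lines class_index field_name (class_has_field_py lines class_index field_name)

-- ===== LEMMAS AND PROOFS =====

-- B's index comparison, expressed directly on the (un-stripped) region list.
def bCmp (field_name : String) (xs : List String) : Bool :=
  let tail := xs.map PySem.Str.strip
  let n := tail.length
  let firstClass := (tail.findIdx? (fun s => PySem.Str.startswith s "class ")).getD n
  let firstField := (tail.findIdx? (fun s =>
      PySem.Str.startswith s (field_name ++ ":") && !PySem.Str.startswith s "class ")).getD n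
  decide (firstField < firstClass)

theorem bCmp_nil (field_name : String) : bCmp field_name [] = false := rfl

theorem getD_map_succ (o : Option Nat) (n : Nat) :
    (o.map (· + 1)).getD (n + 1) = o.getD n + 1 := by
  cases o <;> rfl

theorem bCmp_cons (field_name : String) (x : String) (xs : List String) :
    bCmp field_name (x :: xs) =
      if PySem.Str.startswith (PySem.Str.strip x) "class " then false
      else if PySem.Str.startswith (PySem.Str.strip x) (field_name ++ ":") then true
      else bCmp field_name xs := by
  unfold bCmp
  simp only [List.map_cons, List.findIdx?_cons, List.length_cons, List.length_map]
  by_cases hc : PySem.Str.startswith (PySem.Str.strip x) "class " = true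
  · simp only [hc, Bool.not_true, Bool.and_false, ite_true, Bool.false_eq_true,
      ite_false, Option.getD_some, getD_map_succ]
    simp
  · rw [Bool.not_eq_true] at hc
    simp only [hc, Bool.not_false, Bool.and_true, Bool.false_eq_true, ite_false]
    by_cases hf : PySem.Str.startswith (PySem.Str.strip x) (field_name ++ ":") = true
    · simp only [hf, ite_true, Option.getD_some, getD_map_succ]
      simp
    · rw [Bool.not_eq_true] at hf
      simp only [hf, Bool.false_eq_true, ite_false, getD_map_succ]
      simp only [decide_eq_decide]
      omega

theorem goA_eq_bCmp (lines : List String) (field_name : String) :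
    ∀ (xs : List String) (s : Nat), lines.drop s = xs →
      classHasFieldGoA lines field_name ((lines.length - (s : Int)).toNat) (s : Int) = bCmp field_name xs := by
  intro xs
  induction xs with
  | nil =>
      intro s hs
      have hlen : lines.length ≤ s := by
        by_contra h
        have := List.drop_eq_nil_iff.mp hs
        omega
      have hfuel : ((lines.length : Int) - (s : Int)).toNat = 0 := by omega
      rw [hfuel, bCmp_nil]
      rfl
  | cons x rest ih =>
      intro s hs
      have hslt : s < lines.length := by
        by_contra h
        have : lines.drop s = [] := List.drop_eq_nil_iff.mpr (by omega)
        rw [this] at hs; cases hs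
      have hget : lines[s]? = some x := by
        have : (lines.drop s)[0]? = some x := by rw [hs]; rfl
        simpa using this
      have hfuel : ((lines.length : Int) - (s : Int)).toNat
          = ((lines.length : Int) - ((s : Int) + 1)).toNat + 1 := by omega
      rw [hfuel]
      show (match PySem.List.pyGet? lines (s : Int) with
        | none => false
        | some l =>
          if PySem.Str.startswith (PySem.Str.strip l) "class " then false
          else if PySem.Str.startswith (PySem.Str.strip l) (field_name ++ ":") then true
          else classHasFieldGoA lines field_name ((lines.length - ((s : Int) + 1)).toNat) ((s : Int) + 1))
        = bCmp field_name (x :: rest)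
      rw [PySem.List.pyGet?_natCast, hget, bCmp_cons]
      by_cases hc : PySem.Str.startswith (PySem.Str.strip x) "class " = true
      · simp only [if_pos hc]
      · simp only [if_neg hc]
        by_cases hf : PySem.Str.startswith (PySem.Str.strip x) (field_name ++ ":") = true
        · simp only [hf, ite_true]
        · simp only [if_neg hf]
          have hdrop : lines.drop (s + 1) = rest := by
            have : lines.drop (s + 1) = (lines.drop s).drop 1 := by rw [List.drop_drop]
            rw [this, hs]; rfl
          have := ih (s + 1) hdrop
          rw [show ((s : Int) + 1) = ((s + 1 : Nat) : Int) by push_cast; ring]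
          exact this

-- ===== VERDICT (by name: the statement is the Claim_ definition above) =====
theorem class_has_field_py_spec : Claim_equal_class_has_field_py := by
  intro lines class_index field_name _hdom hpre
  unfold Spec_class_has_field_py class_has_field_py class_has_field_py_alt
  have hnn : 0 ≤ class_index + 1 := by
    have : -1 ≤ class_index := hpre
    omega
  obtain ⟨s, hsn⟩ : ∃ s : Nat, class_index + 1 = (s : Int) := ⟨(class_index + 1).toNat, by omega⟩
  rw [hsn, PySem.List.slice_from_natCast]
  exact goA_eq_bCmp lines field_name (lines.drop s) s rfl
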